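-- pv_equiv track=rewrite | github.com/agnel18/anki-fluent-forever-language-card-generator | streamlit_app/language_analyzers/analyzers/fr_analyzer.py | _map_grammatical_role_to_category
-- ===== SOURCE A (Python) =====
-- def _map_grammatical_role_to_category(grammatical_role: str) -> str:
--     """Map grammatical role descriptions to color category names"""
--     role_lower = grammatical_role.lower()
--
--     # Map various grammatical roles to color categories
--     # Order matters: more specific checks first
--     if any(keyword in role_lower for keyword in ['article', 'determiner']):
--         return 'articles'
--     elif any(keyword in role_lower for keyword in ['pronoun', 'personal', 'possessive']):
--         return 'pronouns'
--     elif any(keyword in role_lower for keyword in ['verb', 'action', 'state']):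
--         return 'verbs'
--     elif any(keyword in role_lower for keyword in ['noun', 'object', 'subject']):
--         return 'nouns'
--     elif any(keyword in role_lower for keyword in ['adjective', 'description', 'quality']):
--         return 'adjectives'
--     elif any(keyword in role_lower for keyword in ['adverb', 'manner', 'time', 'place']):
--         return 'adverbs'
--     elif any(keyword in role_lower for keyword in ['modal', 'auxiliary']):
--         return 'verb_conjugation'
--     else:
--         return 'other'
-- ===== SOURCE B (Python) =====
-- _CATEGORY_NAMES = ['articles', 'pronouns', 'verbs', 'nouns',
--                    'adjectives', 'adverbs', 'verb_conjugation']
--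
-- _KEYWORD_GROUPS = [
--     ['article', 'determiner'],
--     ['pronoun', 'personal', 'possessive'],
--     ['verb', 'action', 'state'],
--     ['noun', 'object', 'subject'],
--     ['adjective', 'description', 'quality'],
--     ['adverb', 'manner', 'time', 'place'],
--     ['modal', 'auxiliary'],
-- ]
--
-- # flat keyword -> priority table; priority = index of the category
-- _KEYWORD_PRIORITY = [(k, i) for i, g in enumerate(_KEYWORD_GROUPS) for k in g]
--
--
-- def _map_grammatical_role_to_category(grammatical_role: str) -> str:
--     role_lower = grammatical_role.lower()
--     # collect priorities of ALL matching keywords, return the arg-min category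
--     hits = [p for k, p in _KEYWORD_PRIORITY if k in role_lower]
--     return _CATEGORY_NAMES[min(hits)] if hits else 'other'
-- ===== Notes on version B (the rewrite author's own statement) =====
-- stated objective: alternative
-- what changed: Replaces the ordered if/elif first-match scan with a flat keyword-to-priority table: B collects the priorities of ALL matching keywords and returns the category at the minimum priority (arg-min), indexing a names list; no branch chain or early exit.
import Mathlib
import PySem

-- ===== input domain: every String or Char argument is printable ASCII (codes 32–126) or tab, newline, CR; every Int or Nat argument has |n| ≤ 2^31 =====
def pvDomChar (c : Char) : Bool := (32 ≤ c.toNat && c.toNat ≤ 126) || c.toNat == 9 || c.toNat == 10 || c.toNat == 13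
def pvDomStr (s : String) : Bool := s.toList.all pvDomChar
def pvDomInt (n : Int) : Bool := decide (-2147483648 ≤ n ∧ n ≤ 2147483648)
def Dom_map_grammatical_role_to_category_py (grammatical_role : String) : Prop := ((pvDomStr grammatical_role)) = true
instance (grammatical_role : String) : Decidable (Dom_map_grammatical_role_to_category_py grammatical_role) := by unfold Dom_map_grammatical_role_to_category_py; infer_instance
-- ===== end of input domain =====

-- B replaces A's ordered if/elif first-match scan by an arg-min over a flat keyword→priority
-- table (collect ALL matching keywords' priorities, return the category of the minimum); same cost.

-- ===== PORT A =====
def map_grammatical_role_to_category_py (grammatical_role : String) : String :=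
  let role_lower := PySem.Str.lower grammatical_role
  if ["article", "determiner"].any (fun keyword => PySem.Str.isIn keyword role_lower) then
    "articles"
  else if ["pronoun", "personal", "possessive"].any (fun keyword => PySem.Str.isIn keyword role_lower) then
    "pronouns"
  else if ["verb", "action", "state"].any (fun keyword => PySem.Str.isIn keyword role_lower) then
    "verbs"
  else if ["noun", "object", "subject"].any (fun keyword => PySem.Str.isIn keyword role_lower) then
    "nouns"
  else if ["adjective", "description", "quality"].any (fun keyword => PySem.Str.isIn keyword role_lower) then
    "adjectives"
  else if ["adverb", "manner", "time", "place"].any (fun keyword => PySem.Str.isIn keyword role_lower) then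
    "adverbs"
  else if ["modal", "auxiliary"].any (fun keyword => PySem.Str.isIn keyword role_lower) then
    "verb_conjugation"
  else
    "other"

-- ===== PORT B =====
def pvCategoryNames : List String :=
  ["articles", "pronouns", "verbs", "nouns", "adjectives", "adverbs", "verb_conjugation"]

def pvKeywordGroups : List (List String) :=
  [["article", "determiner"],
   ["pronoun", "personal", "possessive"],
   ["verb", "action", "state"],
   ["noun", "object", "subject"],
   ["adjective", "description", "quality"],
   ["adverb", "manner", "time", "place"],
   ["modal", "auxiliary"]]

-- [(k, i) for i, g in enumerate(_KEYWORD_GROUPS) for k in g]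
def pvKeywordPriority : List (String × Int) :=
  (PySem.List.enumerate pvKeywordGroups 0).flatMap (fun ig => ig.2.map (fun k => (k, ig.1)))

def map_grammatical_role_to_category_py_alt (grammatical_role : String) : String :=
  let role_lower := PySem.Str.lower grammatical_role
  let hits := (pvKeywordPriority.filter (fun kp => PySem.Str.isIn kp.1 role_lower)).map (fun kp => kp.2)
  match PySem.List.min? hits (fun x => x) with
  | some m => PySem.List.pyGetD pvCategoryNames m ""   -- index always in range (0..6)
  | none => "other"

-- ===== PRECONDITION & SPEC =====
def Spec_map_grammatical_role_to_category_py (grammatical_role : String) (out : String) : Prop := out = map_grammatical_role_to_category_py_alt grammatical_role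
instance (grammatical_role : String) (out : String) : Decidable (Spec_map_grammatical_role_to_category_py grammatical_role out) := by unfold Spec_map_grammatical_role_to_category_py; infer_instance

-- ===== CLAIM =====
def Claim_equal_map_grammatical_role_to_category_py : Prop := ∀ (grammatical_role : String), Dom_map_grammatical_role_to_category_py grammatical_role → Spec_map_grammatical_role_to_category_py grammatical_role (map_grammatical_role_to_category_py grammatical_role)

-- ===== LEMMAS AND PROOFS =====

-- min over a constant block followed by larger values: the block wins iff nonempty
theorem pv_min_block (i : Int) (g : List String) (q : String → Bool) (rest : List Int)
    (hrest : ∀ x ∈ rest, i ≤ x) :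
    PySem.List.min? (((g.filter q).map (fun _ => i)) ++ rest) (fun x => x)
      = if g.any q then some i else PySem.List.min? rest (fun x => x) := by
  by_cases h : g.any q
  · simp only [h, if_true]
    have hfil : g.filter q ≠ [] := by
      simp only [List.any_eq_true] at h
      obtain ⟨k, hk, hqk⟩ := h
      intro hnil
      have := (List.filter_eq_nil_iff).mp hnil k hk
      simp [hqk] at this
    obtain ⟨x, t, hxt⟩ : ∃ x t, ((g.filter q).map (fun _ => i)) ++ rest = x :: t := by
      cases hc : ((g.filter q).map (fun _ => i)) ++ rest with
      | nil =>
        rw [List.append_eq_nil_iff, List.map_eq_nil_iff] at hc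
        exact absurd hc.1 hfil
      | cons x t => exact ⟨x, t, rfl⟩
    have hm : PySem.List.min? (((g.filter q).map (fun _ => i)) ++ rest) (fun y => y)
        = some (t.foldl min x) := by
      rw [hxt]; exact PySem.List.min?_id_cons x t
    have hi_mem : i ∈ ((g.filter q).map (fun _ => i)) ++ rest := by
      obtain ⟨a, ha⟩ := List.exists_mem_of_ne_nil _ hfil
      exact List.mem_append_left _ (List.mem_map.mpr ⟨a, ha, rfl⟩)
    have hle : t.foldl min x ≤ i := by simpa using PySem.List.min?_isMin hm i hi_mem
    have hge : i ≤ t.foldl min x := by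
      have hmem := PySem.List.min?_mem hm
      rcases List.mem_append.mp hmem with hmem | hmem
      · obtain ⟨a, _, ha⟩ := List.mem_map.mp hmem
        omega
      · exact hrest _ hmem
    rw [hm]
    congr 1
    omega
  · simp only [h]
    have : g.filter q = [] := List.filter_eq_nil_iff.mpr (by
      intro a ha hqa
      exact h (List.any_eq_true.mpr ⟨a, ha, hqa⟩))
    rw [this]
    rfl

-- the last block: same statement with no tail
theorem pv_min_last (i : Int) (g : List String) (q : String → Bool) :
    PySem.List.min? ((g.filter q).map (fun _ => i)) (fun x => x)
      = if g.any q then some i else none := by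
  rw [← List.append_nil ((g.filter q).map (fun _ => i)),
      pv_min_block i g q [] (by simp)]
  cases g.any q <;> rfl

theorem pv_table_eq :
    pvKeywordPriority =
      (["article", "determiner"].map (fun k => (k, (0:Int))))
      ++ ((["pronoun", "personal", "possessive"].map (fun k => (k, (1:Int))))
      ++ ((["verb", "action", "state"].map (fun k => (k, (2:Int))))
      ++ ((["noun", "object", "subject"].map (fun k => (k, (3:Int))))
      ++ ((["adjective", "description", "quality"].map (fun k => (k, (4:Int))))
      ++ ((["adverb", "manner", "time", "place"].map (fun k => (k, (5:Int))))
      ++ (["modal", "auxiliary"].map (fun k => (k, (6:Int))))))))) := by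
  decide

-- ===== VERDICT =====
theorem map_grammatical_role_to_category_py_spec : Claim_equal_map_grammatical_role_to_category_py := by
  intro s _
  unfold Spec_map_grammatical_role_to_category_py
  unfold map_grammatical_role_to_category_py map_grammatical_role_to_category_py_alt
  have hhits :
      (pvKeywordPriority.filter (fun kp => PySem.Str.isIn kp.1 (PySem.Str.lower s))).map (fun kp => kp.2)
      = ((["article", "determiner"].filter (fun k => PySem.Str.isIn k (PySem.Str.lower s))).map (fun _ => (0:Int)))
        ++ (((["pronoun", "personal", "possessive"].filter (fun k => PySem.Str.isIn k (PySem.Str.lower s))).map (fun _ => (1:Int)))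
        ++ (((["verb", "action", "state"].filter (fun k => PySem.Str.isIn k (PySem.Str.lower s))).map (fun _ => (2:Int)))
        ++ (((["noun", "object", "subject"].filter (fun k => PySem.Str.isIn k (PySem.Str.lower s))).map (fun _ => (3:Int)))
        ++ (((["adjective", "description", "quality"].filter (fun k => PySem.Str.isIn k (PySem.Str.lower s))).map (fun _ => (4:Int)))
        ++ (((["adverb", "manner", "time", "place"].filter (fun k => PySem.Str.isIn k (PySem.Str.lower s))).map (fun _ => (5:Int)))
        ++ ((["modal", "auxiliary"].filter (fun k => PySem.Str.isIn k (PySem.Str.lower s))).map (fun _ => (6:Int)))))))) := by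
    rw [pv_table_eq]
    simp only [List.filter_append, List.filter_map, List.map_append, List.map_map,
               Function.comp_def]
  simp only [hhits]
  rw [pv_min_block 0 _ _ _ (by intro x hx; simp [List.mem_append] at hx; omega),
      pv_min_block 1 _ _ _ (by intro x hx; simp [List.mem_append] at hx; omega),
      pv_min_block 2 _ _ _ (by intro x hx; simp [List.mem_append] at hx; omega),
      pv_min_block 3 _ _ _ (by intro x hx; simp [List.mem_append] at hx; omega),
      pv_min_block 4 _ _ _ (by intro x hx; simp [List.mem_append] at hx; omega),
      pv_min_block 5 _ _ _ (by intro x hx; simp at hx; omega),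
      pv_min_last 6 _ _]
  split_ifs <;> rfl
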